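-- pv_equiv track=rewrite | github.com/jano31415/codejam | codejam/y2021/round2/test.py | get_dmg_prog
-- ===== SOURCE A (Python) =====
-- def get_dmg_prog(prog):
--     d=1
--     tot_d = 0
--     for i,x in enumerate(prog):
--         if x == "S":
--             tot_d+=d
--         else:
--             d = 2*d
--     return tot_d
-- ===== SOURCE B (Python) =====
-- def get_dmg_prog(prog):
--     # group first: run lengths of "S" between doublers, then the weighted sum
--     # sum(r * 2**i) evaluated by Horner's rule over the reversed run list
--     runs = []
--     cur = 0
--     for x in prog:
--         if x == "S":
--             cur += 1
--         else:
--             runs.append(cur)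
--             cur = 0
--     runs.append(cur)
--     total = 0
--     for r in reversed(runs):
--         total = 2 * total + r
--     return total
-- ===== Notes on version B (the rewrite author's own statement) =====
-- stated objective: faster
-- what changed: Instead of a single accumulator loop that adds the ever-doubling damage once per shot, B first groups the program into run lengths of 'S' separated by doubling characters and then evaluates the weighted sum sum(r * 2**i) by one Horner pass over the reversed run list.
import Mathlib
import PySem

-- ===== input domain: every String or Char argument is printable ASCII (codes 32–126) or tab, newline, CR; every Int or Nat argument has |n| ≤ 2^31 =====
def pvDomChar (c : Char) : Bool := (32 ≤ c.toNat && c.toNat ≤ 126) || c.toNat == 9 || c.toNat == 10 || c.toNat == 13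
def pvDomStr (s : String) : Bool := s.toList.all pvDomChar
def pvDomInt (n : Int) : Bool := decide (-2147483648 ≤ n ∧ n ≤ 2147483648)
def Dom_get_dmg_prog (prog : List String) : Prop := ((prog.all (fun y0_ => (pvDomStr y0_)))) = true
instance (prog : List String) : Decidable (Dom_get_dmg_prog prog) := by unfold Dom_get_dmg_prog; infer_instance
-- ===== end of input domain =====

-- B groups the program into run lengths of "S" and returns an indexed weighted sum; same value as A's accumulator loop.

-- ===== PORT A =====
-- A: d=1; tot_d=0; for i,x in enumerate(prog): if x=="S": tot_d+=d else: d=2*d; return tot_d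
def get_dmg_prog (prog : List String) : Int :=
  let st := (PySem.List.enumerate prog).foldl
    (fun (s : Int × Int) p => if p.2 == "S" then (s.1, s.2 + s.1) else (2 * s.1, s.2))
    (1, 0)
  st.2

-- ===== PORT B =====
-- B: collect run lengths of "S" (runs ++ final cur), then the weighted sum
-- sum r * 2^i via Horner over reversed(runs)
def get_dmg_prog_alt (prog : List String) : Int :=
  let st := prog.foldl
    (fun (s : List Int × Int) x => if x == "S" then (s.1, s.2 + 1) else (s.1 ++ [s.2], 0))
    ([], 0)
  let runs := st.1 ++ [st.2]
  runs.reverse.foldl (fun total r => 2 * total + r) 0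

-- ===== PRECONDITION & SPEC =====
def Spec_get_dmg_prog (prog : List String) (out : Int) : Prop := out = get_dmg_prog_alt prog
instance (prog : List String) (out : Int) : Decidable (Spec_get_dmg_prog prog out) := by unfold Spec_get_dmg_prog; infer_instance

-- ===== CLAIM (what is proved, stated in full; the proofs are below) =====
def Claim_equal_get_dmg_prog : Prop := ∀ (prog : List String), Dom_get_dmg_prog prog → Spec_get_dmg_prog prog (get_dmg_prog prog)

-- ===== LEMMAS AND PROOFS =====

/-- weighted sum of run lengths: wsum [r0,r1,…] = r0 + 2*r1 + 4*r2 + … -/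
def pvWsum : List Int → Int
  | [] => 0
  | r :: t => r + 2 * pvWsum t

theorem pvWsum_append (rs : List Int) (c : Int) :
    pvWsum (rs ++ [c]) = pvWsum rs + 2 ^ rs.length * c := by
  induction rs with
  | nil => simp [pvWsum]
  | cons r t ih => simp [pvWsum, ih, pow_succ]; ring

/-- A's loop ignores the enumerate index -/
theorem foldA_enum (prog : List String) (s : Int × Int) (k : Int) :
    (PySem.List.enumerate prog k).foldl
      (fun (s : Int × Int) p => if p.2 == "S" then (s.1, s.2 + s.1) else (2 * s.1, s.2)) s
    = prog.foldl (fun (s : Int × Int) x => if x == "S" then (s.1, s.2 + s.1) else (2 * s.1, s.2)) s := by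
  induction prog generalizing s k with
  | nil => simp [PySem.List.enumerate_nil]
  | cons x t ih =>
    simp only [PySem.List.enumerate_cons, List.foldl_cons]
    exact ih _ _

/-- B's Horner pass over the reversed run list computes the weighted sum -/
theorem foldB_horner (rs : List Int) :
    rs.reverse.foldl (fun total r => 2 * total + r) 0 = pvWsum rs := by
  rw [List.foldl_reverse]
  induction rs with
  | nil => simp [pvWsum]
  | cons r t ih => simp [pvWsum, ih]; ring

/-- main invariant: A's running total equals the weighted sum of B's runs-so-far -/
theorem pvKey (prog : List String) (runs : List Int) (cur d tot : Int)
    (hd : d = 2 ^ runs.length)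
    (ht : tot = pvWsum runs + 2 ^ runs.length * cur) :
    (prog.foldl (fun (s : Int × Int) x => if x == "S" then (s.1, s.2 + s.1) else (2 * s.1, s.2)) (d, tot)).2
    = (fun (s : List Int × Int) => pvWsum s.1 + 2 ^ s.1.length * s.2)
        (prog.foldl (fun (s : List Int × Int) x => if x == "S" then (s.1, s.2 + 1) else (s.1 ++ [s.2], 0)) (runs, cur)) := by
  induction prog generalizing runs cur d tot with
  | nil => simpa using ht
  | cons x t ih =>
    by_cases hx : x == "S"
    · simp only [List.foldl_cons, hx, if_pos]
      exact ih runs (cur + 1) d (tot + d) hd (by rw [ht, hd]; ring)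
    · simp only [List.foldl_cons, hx, if_neg, Bool.false_eq_true, not_false_iff]
      refine ih (runs ++ [cur]) 0 (2 * d) tot ?_ ?_
      · simp [hd, pow_succ]; ring
      · rw [pvWsum_append, ht]; ring

-- ===== VERDICT (by name: the statement is the Claim_ definition above) =====
theorem get_dmg_prog_spec : Claim_equal_get_dmg_prog := by
  intro prog _
  show get_dmg_prog prog = get_dmg_prog_alt prog
  unfold get_dmg_prog get_dmg_prog_alt
  dsimp only
  rw [foldA_enum]
  rw [pvKey prog [] 0 1 0 (by simp) (by simp [pvWsum])]
  rw [foldB_horner, pvWsum_append]
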